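-- pv_equiv track=rewrite | github.com/Nadil-K/aces-coders-v10.0 | Spaghetti with Hotdogs.py | createPrimeFactors
-- ===== SOURCE A (Python) =====
-- import math
--
-- def createPrimes():
--     primes = [2]
--     for i in range(3, 31623, 2):
--         isprime = True
--         limit = math.sqrt(i)
--         for p in primes:
--             if p > limit:
--                 break
--             if i % p == 0:
--                 isprime = False
--                 break
--         if isprime:
--             primes.append(i)
--     return primes
--
-- def createPrimeFactors(arr):
--     n = len(arr)
--     primes = createPrimes()
--     factor_index  = dict()
--     prime_factors = list()
--
--     for i, j in enumerate(arr):
--         pf = list()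
--         lim = math.sqrt(j)
--         for p in primes:
--             if p > lim:
--                 pf.append(j)
--                 if j not in factor_index :
--                     factor_index [j] = set()
--                 factor_index [j].add(i)
--                 break
--
--             if j % p == 0:
--                 pf.append(p)
--                 if p not in factor_index :
--                     factor_index [p] = set()
--                 factor_index [p].add(i)
--
--                 j //= p
--                 while j % p == 0:
--                     j //= p
--                 if j == 1:
--                     break
--                 lim = math.sqrt(j)
--
--         prime_factors.append(pf)
--     return prime_factors, factor_index
-- ===== SOURCE B (Python) =====
-- import math
--
-- def createPrimes():
--     primes = [2]
--     for i in range(3, 31623, 2):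
--         isprime = True
--         limit = math.sqrt(i)
--         for p in primes:
--             if p > limit:
--                 break
--             if i % p == 0:
--                 isprime = False
--                 break
--         if isprime:
--             primes.append(i)
--     return primes
--
-- def _step(p, state):
--     # advance one element's factorization state by one prime
--     r, pf, done = state
--     if done:
--         return state
--     if p > math.sqrt(r):
--         return (r, pf + [r], True)
--     if r % p == 0:
--         pf = pf + [p]
--         r //= p
--         while r % p == 0:
--             r //= p
--         return (r, pf, r == 1)
--     return (r, pf, False)
--
-- def createPrimeFactors(arr):
--     # prime-major sweep: for each prime, advance every element's state in lockstep
--     primes = createPrimes()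
--     states = [(j, [], False) for j in arr]
--     for p in primes:
--         states = [_step(p, st) for st in states]
--     prime_factors = [pf for _, pf, _ in states]
--     factor_index = {}
--     for i, pf in enumerate(prime_factors):
--         for q in pf:
--             factor_index.setdefault(q, set()).add(i)
--     return prime_factors, factor_index
-- ===== Notes on version B (the rewrite author's own statement) =====
-- stated objective: alternative
-- what changed: A factors each element by walking down the prime list with early breaks, fusing the index-map updates into that scan; B transposes the traversal: a prime-major lockstep sweep advances per-element (residual, factors, done) states one prime at a time across the whole array, and the factor index is built afterwards in a separate element-major pass over the finished factor lists.
import Mathlib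
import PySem

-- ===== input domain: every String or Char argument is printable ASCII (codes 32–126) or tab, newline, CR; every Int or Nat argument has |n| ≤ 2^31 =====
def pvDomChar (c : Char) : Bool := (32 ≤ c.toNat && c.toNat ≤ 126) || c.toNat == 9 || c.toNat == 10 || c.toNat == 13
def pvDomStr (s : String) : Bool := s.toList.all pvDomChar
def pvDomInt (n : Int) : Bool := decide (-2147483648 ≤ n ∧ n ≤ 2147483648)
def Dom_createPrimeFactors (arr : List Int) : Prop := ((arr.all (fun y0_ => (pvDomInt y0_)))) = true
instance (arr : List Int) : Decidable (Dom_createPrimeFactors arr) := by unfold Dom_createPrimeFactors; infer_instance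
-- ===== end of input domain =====

-- B replaces A's element-major scan (each element runs down the prime list with early break)
-- by a prime-major lockstep sweep (each prime advances the per-element factorization states),
-- plus a separate pass building the index map (objective: alternative traversal, same results).

-- ===== PORT A =====

-- Python `p > math.sqrt(j)` for integers p ≥ 0, 0 ≤ j ≤ 2^31: exact as `p*p > j` — double sqrt is
-- correctly rounded and an integer p can only straddle sqrt(j) by ≥ 1/(2p) ≈ 1e-5, far above one ulp.
-- (Callers never reach this with j < 0: math.sqrt raises ValueError there — excluded by Pre_.)
def pyGtSqrt (p j : Int) : Bool := decide (j < p * p)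

-- inner `for p in primes: … break` of createPrimes
def isPrimeScan (i : Int) : List Int → Bool
  | [] => true
  | p :: ps =>
    if pyGtSqrt p i then true
    else if PySem.Int.mod i p == 0 then false
    else isPrimeScan i ps

-- createPrimes()
def createPrimesPy : List Int :=
  (PySem.List.pyRange 3 31623 2).foldl
    (fun primes i => if isPrimeScan i primes then primes ++ [i] else primes) [2]

-- `j //= p; while j % p == 0: j //= p` in both sources (guards 2 ≤ p, 1 ≤ j are for termination
-- only; every call site has p ≥ 2 and j ≥ 1, where the guard agrees with Python's `j % p == 0`)
def divOut (j p : Int) : Int :=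
  if h : 2 ≤ p ∧ 1 ≤ j ∧ PySem.Int.mod j p = 0 then divOut (PySem.Int.floordiv j p) p else j
  termination_by j.toNat
  decreasing_by
    have h1 : PySem.Int.floordiv j p = j / p := PySem.Int.floordiv_eq_ediv_of_pos (by omega)
    have h2 : j / p < j := by
      rw [Int.ediv_lt_iff_lt_mul (by omega)]; nlinarith
    have h3 : 0 ≤ j / p := Int.ediv_nonneg (by omega) (by omega)
    simp [h1]; omega

-- `if k not in factor_index: factor_index[k] = set()` followed by `factor_index[k].add(i)`
-- (the same two Python lines occur in Source B as `factor_index.setdefault(k, set()).add(i)`)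
def dictSetAdd (fi : PySem.Dict Int (PySem.Set Int)) (k i : Int) : PySem.Dict Int (PySem.Set Int) :=
  let fi' := if (fi.get? k).isNone then fi.insert k PySem.Set.empty else fi
  fi'.modify k PySem.Set.empty (fun s => PySem.Set.add s i)

-- A's inner `for p in primes:` loop for one element j at index i (pf/factor_index threaded)
def aInner (i : Int) (ps : List Int) (j : Int) (pf : List Int)
    (fi : PySem.Dict Int (PySem.Set Int)) : List Int × PySem.Dict Int (PySem.Set Int) :=
  match ps with
  | [] => (pf, fi)
  | p :: ps =>
    if pyGtSqrt p j then (pf ++ [j], dictSetAdd fi j i)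
    else if PySem.Int.mod j p == 0 then
      let pf' := pf ++ [p]
      let fi' := dictSetAdd fi p i
      let j' := divOut (PySem.Int.floordiv j p) p
      if j' == 1 then (pf', fi') else aInner i ps j' pf' fi'
    else aInner i ps j pf fi

def createPrimeFactors (arr : List Int) : List (List Int) × (List (Int × List Int)) :=
  let primes := createPrimesPy
  let r := (PySem.List.enumerate arr).foldl
    (fun (acc : List (List Int) × PySem.Dict Int (PySem.Set Int)) ij =>
      let r := aInner ij.1 primes ij.2 [] acc.2
      (acc.1 ++ [r.1], r.2))
    ([], PySem.Dict.empty)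
  (r.1, r.2.items)

-- ===== PORT B =====

-- Source B's _step: advance one element's state (residual, pf, done) by one prime
def stepB (p : Int) (st : Int × List Int × Bool) : Int × List Int × Bool :=
  if st.2.2 then st
  else if pyGtSqrt p st.1 then (st.1, st.2.1 ++ [st.1], true)
  else if PySem.Int.mod st.1 p == 0 then
    let r' := divOut (PySem.Int.floordiv st.1 p) p
    (r', st.2.1 ++ [p], r' == 1)
  else st

def createPrimeFactors_alt (arr : List Int) : List (List Int) × (List (Int × List Int)) :=
  let primes := createPrimesPy          -- Source B's createPrimes is the verbatim same helper
  let states := arr.map (fun j => (j, ([] : List Int), false))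
  let states := primes.foldl (fun sts p => sts.map (stepB p)) states
  let pfs := states.map (fun st => st.2.1)
  let fi := (PySem.List.enumerate pfs).foldl
    (fun fi ipf => ipf.2.foldl (fun fi q => dictSetAdd fi q ipf.1) fi)
    PySem.Dict.empty
  (pfs, fi.items)

-- ===== PRECONDITION & SPEC =====

-- Pre_ excludes arrays with a negative element: there A's `math.sqrt(j)` raises ValueError
-- (and B's `math.sqrt(r)` raises the same way).
def Pre_createPrimeFactors (arr : List Int) : Prop := ∀ j ∈ arr, 0 ≤ j
instance (arr : List Int) : Decidable (Pre_createPrimeFactors arr) := by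
  unfold Pre_createPrimeFactors; infer_instance

def pvWitness_createPrimeFactors : List Int := [12, 7, 100]

def Spec_createPrimeFactors (arr : List Int) (out : List (List Int) × (List (Int × List Int))) : Prop := out = createPrimeFactors_alt arr
instance (arr : List Int) (out : List (List Int) × (List (Int × List Int))) : Decidable (Spec_createPrimeFactors arr out) := by unfold Spec_createPrimeFactors; infer_instance

-- ===== CLAIM (what is proved, stated in full; the proofs are below) =====
def Claim_equal_createPrimeFactors : Prop := ∀ (arr : List Int), Dom_createPrimeFactors arr → Pre_createPrimeFactors arr → Spec_createPrimeFactors arr (createPrimeFactors arr)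

-- ===== LEMMAS AND PROOFS =====

-- proof-side description of one element's distinct-factor list (early-break recursion)
def factB (j : Int) : List Int → List Int
  | [] => []
  | p :: ps =>
    if pyGtSqrt p j then [j]
    else if PySem.Int.mod j p == 0 then
      let j' := divOut (PySem.Int.floordiv j p) p
      if j' == 1 then [p] else p :: factB j' ps
    else factB j ps

-- A's fused inner loop = the pure factor list plus the fold of index updates over it
theorem aInner_eq (i : Int) (ps : List Int) : ∀ (j : Int) (pf : List Int)
    (fi : PySem.Dict Int (PySem.Set Int)),
    aInner i ps j pf fi =
      (pf ++ factB j ps, (factB j ps).foldl (fun d p => dictSetAdd d p i) fi) := by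
  induction ps with
  | nil => intro j pf fi; simp [aInner, factB]
  | cons p ps ih =>
    intro j pf fi
    simp only [aInner, factB]
    split_ifs with h1 h2 h3
    · simp
    · simp
    · rw [ih]; simp
    · rw [ih]

-- a finished state is a fixed point of every further step
theorem foldl_stepB_done (ps : List Int) (r : Int) (pf : List Int) :
    ps.foldl (fun st p => stepB p st) (r, pf, true) = (r, pf, true) := by
  induction ps with
  | nil => rfl
  | cons p ps ih => simpa [stepB] using ih

-- running one element's state down the whole prime list collects exactly factB
theorem foldl_stepB_snd (ps : List Int) : ∀ (r : Int) (pf : List Int),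
    (ps.foldl (fun st p => stepB p st) (r, pf, false)).2.1 = pf ++ factB r ps := by
  induction ps with
  | nil => intro r pf; simp [factB]
  | cons p ps ih =>
    intro r pf
    rw [List.foldl_cons]
    by_cases h1 : pyGtSqrt p r = true
    · rw [show stepB p (r, pf, false) = (r, pf ++ [r], true) by simp [stepB, h1]]
      rw [foldl_stepB_done]
      simp [factB, h1]
    · by_cases h2 : (PySem.Int.mod r p == 0) = true
      · by_cases h3 : (divOut (PySem.Int.floordiv r p) p == 1) = true
        · rw [show stepB p (r, pf, false)
              = (divOut (PySem.Int.floordiv r p) p, pf ++ [p], true) by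
                simp [stepB, h1, h2, h3]]
          rw [foldl_stepB_done]
          simp [factB, h1, h2, h3]
        · rw [show stepB p (r, pf, false)
              = (divOut (PySem.Int.floordiv r p) p, pf ++ [p], false) by
                simp [stepB, h1, h2]
                simpa using h3]
          rw [ih]
          simp [factB, h1, h2, h3]
      · rw [show stepB p (r, pf, false) = (r, pf, false) by simp [stepB, h1, h2]]
        rw [ih]
        simp [factB, h1, h2]

-- prime-major lockstep sweep = independent element-major folds
theorem foldl_map_comm {α β : Type} (f : β → α → α) (ps : List β) : ∀ (sts : List α),
    ps.foldl (fun s p => s.map (f p)) sts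
      = sts.map (fun st => ps.foldl (fun st p => f p st) st) := by
  induction ps with
  | nil => intro sts; simp
  | cons p ps ih => intro sts; simp [ih, List.map_map, Function.comp_def]

-- A's outer loop produces the mapped factor lists and the two-pass index fold
theorem outer_eq (primes : List Int) (l : List Int) : ∀ (s : Int) (acc : List (List Int))
    (fi : PySem.Dict Int (PySem.Set Int)),
    (PySem.List.enumerate l s).foldl
      (fun (a : List (List Int) × PySem.Dict Int (PySem.Set Int)) ij =>
        let r := aInner ij.1 primes ij.2 [] a.2
        (a.1 ++ [r.1], r.2)) (acc, fi) =
    (acc ++ l.map (fun j => factB j primes),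
      (PySem.List.enumerate (l.map (fun j => factB j primes)) s).foldl
        (fun fi ipf => ipf.2.foldl (fun fi p => dictSetAdd fi p ipf.1) fi) fi) := by
  induction l with
  | nil => intro s acc fi; simp [PySem.List.enumerate_nil]
  | cons x l ih =>
    intro s acc fi
    rw [PySem.List.enumerate_cons, List.foldl_cons]
    rw [ih]
    simp [aInner_eq, PySem.List.enumerate_cons]

-- ===== VERDICT (by name: the statement is the Claim_ definition above) =====
theorem a_eq (arr : List Int) :
    createPrimeFactors arr
      = (arr.map (fun j => factB j createPrimesPy),
        ((PySem.List.enumerate (arr.map (fun j => factB j createPrimesPy))).foldl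
          (fun fi ipf => ipf.2.foldl (fun fi q => dictSetAdd fi q ipf.1) fi)
          PySem.Dict.empty).items) := by
  simp only [createPrimeFactors]
  rw [outer_eq createPrimesPy arr 0 [] PySem.Dict.empty]
  simp

theorem b_pipeline (ps : List Int) (arr : List Int) :
    (ps.foldl (fun sts p => sts.map (stepB p))
        (arr.map (fun j => (j, ([] : List Int), false)))).map (fun st => st.2.1)
      = arr.map (fun j => factB j ps) := by
  rw [foldl_map_comm stepB ps, List.map_map, List.map_map]
  apply List.map_congr_left
  intro j _
  show (List.foldl (fun st p => stepB p st) (j, ([] : List Int), false) ps).2.1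
      = factB j ps
  exact (foldl_stepB_snd ps j []).trans (List.nil_append _)

theorem b_eq (arr : List Int) :
    createPrimeFactors_alt arr
      = (arr.map (fun j => factB j createPrimesPy),
        ((PySem.List.enumerate (arr.map (fun j => factB j createPrimesPy))).foldl
          (fun fi ipf => ipf.2.foldl (fun fi q => dictSetAdd fi q ipf.1) fi)
          PySem.Dict.empty).items) := by
  simp only [createPrimeFactors_alt]
  rw [b_pipeline createPrimesPy arr]

theorem createPrimeFactors_spec : Claim_equal_createPrimeFactors := by
  intro arr _ _
  rw [Spec_createPrimeFactors, a_eq, b_eq]
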